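-- pv_equiv track=rewrite | github.com/PaulGuo5/Leetcode-notes | notes/0941/0941.py | validMountainArray1
-- ===== SOURCE A (Python) =====
-- from typing import List
--
-- def validMountainArray1(A: List[int]) -> bool:
--     # Time limit exceeds
--     if len(A) < 3:
--         return False
--     if sorted(A) == A:
--         return False
--     for i in range(1, len(A)):
--         if sorted(A[:i+1]) == A[:i+1] and sorted(A[i:][::-1]) == A[i:][::-1] and len(set(A[:i+1])) == len(A[:i+1]) and len(set(A[i:][::-1])) == len(A[i:][::-1]):
--             return True
--     return False
-- ===== SOURCE B (Python) =====
-- from typing import List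
--
-- def validMountainArray1(A: List[int]) -> bool:
--     n = len(A)
--     i = 0
--     while i + 1 < n and A[i] < A[i + 1]:
--         i += 1
--     if i == 0 or i == n - 1:
--         return False
--     while i + 1 < n and A[i] > A[i + 1]:
--         i += 1
--     return i == n - 1
-- ===== Notes on version B (the rewrite author's own statement) =====
-- stated objective: faster
-- what changed: Replaced the per-split sort/slice/set scan (sorting every prefix and suffix for each candidate peak) with a single two-pointer walk: climb while strictly increasing, then descend while strictly decreasing, and check the walk started, peaked inside, and reached the end.
import Mathlib
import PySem

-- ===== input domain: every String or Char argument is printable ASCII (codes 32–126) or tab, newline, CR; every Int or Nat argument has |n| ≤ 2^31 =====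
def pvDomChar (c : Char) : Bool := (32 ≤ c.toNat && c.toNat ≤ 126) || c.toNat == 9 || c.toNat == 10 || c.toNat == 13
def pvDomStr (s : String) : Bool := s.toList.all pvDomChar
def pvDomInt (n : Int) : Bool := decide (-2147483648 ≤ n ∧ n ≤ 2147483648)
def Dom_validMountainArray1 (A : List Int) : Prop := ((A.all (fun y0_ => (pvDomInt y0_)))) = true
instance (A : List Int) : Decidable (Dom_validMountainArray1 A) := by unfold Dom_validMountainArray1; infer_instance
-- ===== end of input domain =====

-- B replaces A's per-split sort/slice/set scan by a single two-pointer up-then-down walk.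

-- ===== PORT A =====
def validMountainArray1 (A : List Int) : Bool :=
  if A.length < 3 then false
  else if PySem.List.sorted A (fun x => x) false = A then false
  else (PySem.List.pyRange 1 (A.length : Int) 1).any (fun i =>
    let p := PySem.List.slice A none (some (i + 1))        -- A[:i+1]
    let s := (PySem.List.slice? (PySem.List.slice A (some i) none) none none (-1)).getD []  -- A[i:][::-1]
    (decide (PySem.List.sorted p (fun x => x) false = p)) &&
    (decide (PySem.List.sorted s (fun x => x) false = s)) &&
    (decide ((PySem.Set.ofList p).length = p.length)) &&
    (decide ((PySem.Set.ofList s).length = s.length)))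

-- ===== PORT B =====
def walkUp (A : List Int) (i : Nat) : Nat :=
  if h : i + 1 < A.length ∧ A.getD i 0 < A.getD (i + 1) 0 then walkUp A (i + 1) else i
termination_by A.length - i
decreasing_by omega

def walkDown (A : List Int) (i : Nat) : Nat :=
  if h : i + 1 < A.length ∧ A.getD (i + 1) 0 < A.getD i 0 then walkDown A (i + 1) else i
termination_by A.length - i
decreasing_by omega

def validMountainArray1_alt (A : List Int) : Bool :=
  let n := A.length
  let i := walkUp A 0
  if i = 0 ∨ i = n - 1 then false
  else decide (walkDown A i = n - 1)

-- ===== PRECONDITION & SPEC =====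
def Spec_validMountainArray1 (A : List Int) (out : Bool) : Prop := out = validMountainArray1_alt A
instance (A : List Int) (out : Bool) : Decidable (Spec_validMountainArray1 A out) := by unfold Spec_validMountainArray1; infer_instance

-- ===== CLAIM (what is proved, stated in full; the proofs are below) =====
def Claim_equal_validMountainArray1 : Prop := ∀ (A : List Int), Dom_validMountainArray1 A → Spec_validMountainArray1 A (validMountainArray1 A)

-- ===== LEMMAS AND PROOFS =====

-- the common functional specification: A strictly rises to a peak p and strictly falls after it
def GoodMt (A : List Int) : Prop := ∃ p : Nat, 0 < p ∧ p + 1 < A.length ∧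
  (∀ j, j < p → A.getD j 0 < A.getD (j + 1) 0) ∧
  (∀ j, p ≤ j → j + 1 < A.length → A.getD (j + 1) 0 < A.getD j 0)

lemma foldl_add_sublist (l s : List Int) : (l.foldl PySem.Set.add s).Sublist (s ++ l) := by
  induction l generalizing s with
  | nil => simp
  | cons x t ih =>
    have h1 : (t.foldl PySem.Set.add (PySem.Set.add s x)).Sublist (PySem.Set.add s x ++ t) := ih _
    have h2 : (PySem.Set.add s x).Sublist (s ++ [x]) := by
      simp only [PySem.Set.add, PySem.Set.contains]
      split_ifs with hx
      · exact List.sublist_append_left s [x]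
      · exact List.Sublist.refl _
    have h3 : (PySem.Set.add s x ++ t).Sublist ((s ++ [x]) ++ t) := h2.append_right t
    have h4 : ((x :: t).foldl PySem.Set.add s) = t.foldl PySem.Set.add (PySem.Set.add s x) := rfl
    rw [h4]
    have := h1.trans h3
    simpa using this

lemma ofList_sublist (l : List Int) : (PySem.Set.ofList l).Sublist l := by
  have := foldl_add_sublist l []
  simpa [← PySem.Set.ofList_eq_foldl] using this

lemma setLen_iff (l : List Int) : (PySem.Set.ofList l).length = l.length ↔ l.Nodup := by
  constructor
  · intro h
    have heq : PySem.Set.ofList l = l := (ofList_sublist l).eq_of_length h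
    rw [← heq]; exact PySem.Set.nodup_ofList l
  · intro h
    have h1 : (PySem.Set.ofList l).length ≤ l.length := (ofList_sublist l).length_le
    have h2 : l.Subperm (PySem.Set.ofList l) :=
      List.subperm_of_subset h (fun x hx => (PySem.Set.mem_ofList l x).mpr hx)
    have := h2.length_le
    omega

lemma sorted_id_iff (l : List Int) :
    PySem.List.sorted l (fun x => x) false = l ↔ l.Pairwise (· ≤ ·) := by
  constructor
  · intro h
    have := PySem.List.sorted_pairwise l (fun x => x)
    rw [h] at this
    exact this
  · intro h
    exact PySem.List.sorted_eq_self_of_pairwise l (fun x => x) h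

lemma strict_iff (l : List Int) :
    (PySem.List.sorted l (fun x => x) false = l ∧ (PySem.Set.ofList l).length = l.length)
      ↔ l.Pairwise (· < ·) := by
  rw [sorted_id_iff, setLen_iff, List.Nodup]
  constructor
  · rintro ⟨h1, h2⟩
    exact (h1.and h2).imp (fun h => lt_of_le_of_ne h.1 h.2)
  · intro h
    exact ⟨h.imp le_of_lt, h.imp ne_of_lt⟩

lemma step_pairwise (R : Int → Int → Prop) (ht : ∀ a b c, R a b → R b c → R a c) (l : List Int) :
    l.Pairwise R ↔ ∀ j, j + 1 < l.length → R (l.getD j 0) (l.getD (j + 1) 0) := by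
  rw [List.pairwise_iff_getElem]
  constructor
  · intro h j hj
    rw [List.getD_eq_getElem l 0 (by omega), List.getD_eq_getElem l 0 hj]
    exact h j (j + 1) (by omega) hj (by omega)
  · intro h i j hi hj hij
    have key : ∀ m (hm : m < l.length), i < m → R (l[i]'hi) (l[m]'hm) := by
      intro m
      induction m with
      | zero => intro _ h0; omega
      | succ m ih =>
        intro hm him
        have hstep : R (l.getD m 0) (l.getD (m + 1) 0) := h m hm
        rw [List.getD_eq_getElem l 0 (by omega), List.getD_eq_getElem l 0 hm] at hstep
        rcases Nat.lt_or_ge i m with h1 | h2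
        · exact ht _ _ _ (ih (by omega) h1) hstep
        · have : i = m := by omega
          subst this
          exact hstep
    exact key j hj hij

lemma getD_take (A : List Int) (m j : Nat) (h : j < m) (h2 : j < A.length) :
    (A.take m).getD j 0 = A.getD j 0 := by
  rw [List.getD_eq_getElem _ 0 (by simp [List.length_take]; omega),
      List.getD_eq_getElem _ 0 h2, List.getElem_take]

lemma getD_drop (A : List Int) (k j : Nat) (h : k + j < A.length) :
    (A.drop k).getD j 0 = A.getD (k + j) 0 := by
  rw [List.getD_eq_getElem _ 0 (by simp [List.length_drop]; omega),
      List.getD_eq_getElem _ 0 h, List.getElem_drop]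

lemma take_step (A : List Int) (k : Nat) (hk : k < A.length) :
    (A.take (k + 1)).Pairwise (· < ·) ↔ ∀ j, j < k → A.getD j 0 < A.getD (j + 1) 0 := by
  rw [step_pairwise (fun a b => a < b) (fun _ _ _ h1 h2 => lt_trans h1 h2) (A.take (k + 1))]
  have hlen : (A.take (k + 1)).length = k + 1 := by
    simp [List.length_take]; omega
  rw [hlen]
  constructor
  · intro h j hj
    have := h j (by omega)
    rwa [getD_take A (k+1) j (by omega) (by omega),
         getD_take A (k+1) (j+1) (by omega) (by omega)] at this
  · intro h j hj
    have := h j (by omega)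
    rwa [← getD_take A (k+1) j (by omega) (by omega),
         ← getD_take A (k+1) (j+1) (by omega) (by omega)] at this

lemma drop_step (A : List Int) (k : Nat) (hk : k < A.length) :
    (A.drop k).reverse.Pairwise (· < ·) ↔
      ∀ j, k ≤ j → j + 1 < A.length → A.getD (j + 1) 0 < A.getD j 0 := by
  rw [List.pairwise_reverse]
  rw [step_pairwise (fun a b => b < a) (fun _ _ _ h1 h2 => lt_trans h2 h1) (A.drop k)]
  have hlen : (A.drop k).length = A.length - k := by simp
  rw [hlen]
  constructor
  · intro h j hkj hj
    have := h (j - k) (by omega)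
    rwa [getD_drop A k (j - k) (by omega), getD_drop A k (j - k + 1) (by omega),
         (by omega : k + (j - k) = j), (by omega : k + (j - k + 1) = j + 1)] at this
  · intro h j hj
    have := h (k + j) (by omega) (by omega)
    rwa [← (by omega : k + (j + 1) = k + j + 1), ← getD_drop A k j (by omega),
         ← getD_drop A k (j + 1) (by omega)] at this

lemma A_iff (A : List Int) : validMountainArray1 A = true ↔ GoodMt A := by
  by_cases h3 : A.length < 3
  · simp only [validMountainArray1, h3, if_true]
    constructor
    · intro h; cases h
    · rintro ⟨p, hp0, hpn, _, _⟩; omega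
  · by_cases hs : PySem.List.sorted A (fun x => x) false = A
    · simp only [validMountainArray1, h3, if_false, hs, if_true]
      constructor
      · intro h; cases h
      · rintro ⟨p, hp0, hpn, _, hdec⟩
        have hle : A.Pairwise (· ≤ ·) := (sorted_id_iff A).mp hs
        have := (step_pairwise (fun a b => a ≤ b) (fun _ _ _ h1 h2 => le_trans h1 h2) A).mp hle p hpn
        have := hdec p (le_refl p) hpn
        omega
    · simp only [validMountainArray1, h3, hs, if_false, List.any_eq_true]
      constructor
      · rintro ⟨i, hmem, hcond⟩
        rw [PySem.List.mem_pyRange_one] at hmem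
        obtain ⟨hi1, hi2⟩ := hmem
        set k := i.toNat with hk
        have hik : i = (k : Int) := by omega
        have hkn : k < A.length := by omega
        have hk1 : 1 ≤ k := by omega
        simp only [hik] at hcond
        rw [(by push_cast; ring : (k : Int) + 1 = ((k + 1 : Nat) : Int))] at hcond
        rw [PySem.List.slice_to_natCast, PySem.List.slice_from_natCast,
            PySem.List.slice?_none_none_neg_one] at hcond
        simp only [Option.getD_some, Bool.and_eq_true, decide_eq_true_eq] at hcond
        obtain ⟨⟨⟨hs1, hs2⟩, hn1⟩, hn2⟩ := hcond
        have hp : (A.take (k + 1)).Pairwise (· < ·) := (strict_iff _).mp ⟨hs1, hn1⟩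
        have hd : (A.drop k).reverse.Pairwise (· < ·) := (strict_iff _).mp ⟨hs2, hn2⟩
        rcases Nat.lt_or_ge (k + 1) A.length with hlt | hge
        · exact ⟨k, by omega, hlt, (take_step A k hkn).mp hp,
            (drop_step A k hkn).mp hd⟩
        · exfalso
          have htake : A.take (k + 1) = A := List.take_of_length_le (by omega)
          rw [htake] at hp
          exact hs ((sorted_id_iff A).mpr (hp.imp le_of_lt))
      · rintro ⟨p, hp0, hpn, hinc, hdec⟩
        refine ⟨(p : Int), ?_, ?_⟩
        · rw [PySem.List.mem_pyRange_one]
          constructor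
          · exact_mod_cast Nat.one_le_iff_ne_zero.mpr (by omega)
          · exact_mod_cast (by omega : p < A.length)
        · rw [(by push_cast; ring : (p : Int) + 1 = ((p + 1 : Nat) : Int))]
          rw [PySem.List.slice_to_natCast, PySem.List.slice_from_natCast,
              PySem.List.slice?_none_none_neg_one]
          simp only [Option.getD_some, Bool.and_eq_true, decide_eq_true_eq]
          have hp : (A.take (p + 1)).Pairwise (· < ·) :=
            (take_step A p (by omega)).mpr hinc
          have hd : (A.drop p).reverse.Pairwise (· < ·) :=
            (drop_step A p (by omega)).mpr hdec
          obtain ⟨hs1, hn1⟩ := (strict_iff _).mpr hp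
          obtain ⟨hs2, hn2⟩ := (strict_iff _).mpr hd
          exact ⟨⟨⟨hs1, hs2⟩, hn1⟩, hn2⟩

lemma walkUp_spec (A : List Int) (i : Nat) :
    i ≤ walkUp A i ∧ (i < A.length → walkUp A i < A.length) ∧
    (∀ j, i ≤ j → j < walkUp A i → A.getD j 0 < A.getD (j + 1) 0) ∧
    (walkUp A i + 1 < A.length → ¬ A.getD (walkUp A i) 0 < A.getD (walkUp A i + 1) 0) := by
  induction hd : A.length - i generalizing i with
  | zero =>
    rw [walkUp, dif_neg (by intro ⟨h1, _⟩; omega)]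
    exact ⟨le_refl i, fun hi => hi, fun j h1 h2 => by omega, fun hlt => by omega⟩
  | succ m ih =>
    by_cases hc : i + 1 < A.length ∧ A.getD i 0 < A.getD (i + 1) 0
    · rw [walkUp, dif_pos hc]
      obtain ⟨ih1, ih2, ih3, ih4⟩ := ih (i + 1) (by omega)
      refine ⟨by omega, fun _ => ih2 (by omega), ?_, ih4⟩
      intro j hij hj
      rcases Nat.lt_or_ge i j with h1 | h2
      · exact ih3 j (by omega) hj
      · have : j = i := by omega
        subst this
        exact hc.2
    · rw [walkUp, dif_neg hc]
      refine ⟨le_refl i, fun hi => hi, fun j h1 h2 => by omega, fun hlt => ?_⟩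
      intro hcon
      exact hc ⟨hlt, hcon⟩

lemma walkUp_eq (A : List Int) (p : Nat) (hp : p < A.length)
    (hstop : p + 1 < A.length → ¬ A.getD p 0 < A.getD (p + 1) 0) :
    ∀ i, i ≤ p → (∀ j, i ≤ j → j < p → A.getD j 0 < A.getD (j + 1) 0) →
    walkUp A i = p := by
  intro i
  induction hd : p - i generalizing i with
  | zero =>
    intro hip _
    have : i = p := by omega
    subst this
    rw [walkUp, dif_neg]
    intro ⟨h1, h2⟩
    exact hstop h1 h2
  | succ m ih =>
    intro hip hinc
    have hlt : i < p := by omega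
    rw [walkUp, dif_pos ⟨by omega, hinc i (le_refl i) hlt⟩]
    exact ih (i + 1) (by omega) (by omega) (fun j h1 h2 => hinc j (by omega) h2)

lemma walkDown_spec (A : List Int) (i : Nat) :
    i ≤ walkDown A i ∧ (i < A.length → walkDown A i < A.length) ∧
    (∀ j, i ≤ j → j < walkDown A i → A.getD (j + 1) 0 < A.getD j 0) := by
  induction hd : A.length - i generalizing i with
  | zero =>
    rw [walkDown, dif_neg (by intro ⟨h1, _⟩; omega)]
    exact ⟨le_refl i, fun hi => hi, fun j h1 h2 => by omega⟩
  | succ m ih =>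
    by_cases hc : i + 1 < A.length ∧ A.getD (i + 1) 0 < A.getD i 0
    · rw [walkDown, dif_pos hc]
      obtain ⟨ih1, ih2, ih3⟩ := ih (i + 1) (by omega)
      refine ⟨by omega, fun _ => ih2 (by omega), ?_⟩
      intro j hij hj
      rcases Nat.lt_or_ge i j with h1 | h2
      · exact ih3 j (by omega) hj
      · have : j = i := by omega
        subst this
        exact hc.2
    · rw [walkDown, dif_neg hc]
      exact ⟨le_refl i, fun hi => hi, fun j h1 h2 => by omega⟩

lemma walkDown_last (A : List Int) (i : Nat) (hi : i < A.length)
    (hdec : ∀ j, i ≤ j → j + 1 < A.length → A.getD (j + 1) 0 < A.getD j 0) :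
    walkDown A i = A.length - 1 := by
  induction hd : A.length - 1 - i generalizing i with
  | zero =>
    have : i = A.length - 1 := by omega
    subst this
    rw [walkDown, dif_neg]
    intro ⟨h1, _⟩
    omega
  | succ m ih =>
    have hlt : i + 1 < A.length := by omega
    rw [walkDown, dif_pos ⟨hlt, hdec i (le_refl i) hlt⟩]
    exact ih (i + 1) (by omega) (fun j h1 h2 => hdec j (by omega) h2) (by omega)

lemma B_iff (A : List Int) : validMountainArray1_alt A = true ↔ GoodMt A := by
  constructor
  · intro h
    by_cases hcond : walkUp A 0 = 0 ∨ walkUp A 0 = A.length - 1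
    · simp only [validMountainArray1_alt, if_pos hcond] at h
      exact absurd h (by simp)
    · simp only [validMountainArray1_alt, if_neg hcond, decide_eq_true_eq] at h
      have hq0 : walkUp A 0 ≠ 0 := fun hx => hcond (Or.inl hx)
      have hqn : walkUp A 0 ≠ A.length - 1 := fun hx => hcond (Or.inr hx)
      have hn0 : 0 < A.length := by
        by_contra hn
        apply hq0
        rw [walkUp, dif_neg]
        intro ⟨h1, _⟩
        omega
      obtain ⟨hle, hlt, hinc, hstop⟩ := walkUp_spec A 0
      have hqlt : walkUp A 0 < A.length := hlt hn0
      refine ⟨walkUp A 0, by omega, by omega, fun j hj => hinc j (by omega) hj, ?_⟩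
      intro j hj hj1
      obtain ⟨_, _, hdec⟩ := walkDown_spec A (walkUp A 0)
      exact hdec j hj (by omega)
  · rintro ⟨p, hp0, hpn, hinc, hdec⟩
    have hq : walkUp A 0 = p :=
      walkUp_eq A p (by omega)
        (fun h1 h2 => absurd (hdec p (le_refl p) h1) (by omega))
        0 (by omega) (fun j _ hj => hinc j hj)
    simp only [validMountainArray1_alt, hq]
    rw [if_neg (by omega : ¬(p = 0 ∨ p = A.length - 1)), decide_eq_true_eq]
    exact walkDown_last A p (by omega) hdec

-- ===== VERDICT (by name: the statement is the Claim_ definition above) =====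
theorem validMountainArray1_spec : Claim_equal_validMountainArray1 := by
  intro A _
  unfold Spec_validMountainArray1
  have hA := A_iff A
  have hB := B_iff A
  cases h1 : validMountainArray1 A <;> cases h2 : validMountainArray1_alt A <;> simp_all
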